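-- pv_equiv track=rewrite | github.com/knakaji1210/lecture_statmech_particleconfig | particle_config_rc.py | arrangement
-- ===== SOURCE A (Python) =====
-- def arrangement(N, MaxLevel, Energy):
--     if MaxLevel == 1:
--         return [[N - Energy, Energy]]
--     else:
--         l = []
--         Q = Energy // MaxLevel
--         for q in range(Q + 1):
--             r = arrangement(N - q, MaxLevel - 1, Energy - MaxLevel * q)
--             for i in r:
--                 i.append(q)
--             l.extend(r)
--         return l
-- ===== SOURCE B (Python) =====
-- def arrangement(N, MaxLevel, Energy):
--     # Iterative bottom-up worklist instead of recursion; return value only.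
--     states = [(N, Energy, [])]
--     for level in range(MaxLevel, 1, -1):
--         new_states = []
--         for (n, e, suffix) in states:
--             for q in range(e // level + 1):
--                 new_states.append((n - q, e - level * q, [q] + suffix))
--         states = new_states
--     return [[n - e, e] + suffix for (n, e, suffix) in states]
-- ===== Notes on version B (the rewrite author's own statement) =====
-- stated objective: alternative
-- what changed: Replaces A's recursion over MaxLevel with an iterative worklist of partial states (N_rem, E_rem, suffix) expanded level by level from MaxLevel down to 2, then finalized in one map; Pre_ restricts to the natural domain MaxLevel >= 1, outside which A raises or returns an accidental [].
-- outside the precondition, e.g. on arrangement(3, -9227, 9): A returns [], B returns [[-6, 9]]; on arrangement(0, 0, 0): A raises ZeroDivisionError, B returns [[0, 0]]; on arrangement(1, -2, -2): A raises RecursionError, B returns [[3, -2]]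
import Mathlib
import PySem

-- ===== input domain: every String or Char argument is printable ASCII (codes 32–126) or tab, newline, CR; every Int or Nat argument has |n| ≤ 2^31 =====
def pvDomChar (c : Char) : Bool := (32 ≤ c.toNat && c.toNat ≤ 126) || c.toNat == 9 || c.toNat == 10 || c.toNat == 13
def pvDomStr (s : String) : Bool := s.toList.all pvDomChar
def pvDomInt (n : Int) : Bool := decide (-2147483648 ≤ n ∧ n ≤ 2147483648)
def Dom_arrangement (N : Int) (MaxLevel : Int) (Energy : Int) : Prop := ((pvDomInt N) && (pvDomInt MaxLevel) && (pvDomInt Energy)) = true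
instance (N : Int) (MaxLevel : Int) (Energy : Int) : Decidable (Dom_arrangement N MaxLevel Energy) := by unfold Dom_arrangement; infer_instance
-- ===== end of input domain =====

-- B replaces A's recursion over levels by an iterative worklist of partial states expanded
-- level by level (objective: alternative decomposition, same cost; return value only).

-- ===== PORT A =====
-- A recurses on MaxLevel down to the base case MaxLevel == 1; the Lean port recurses on the
-- Nat image of MaxLevel (the `0` branch is fuel exhaustion, unreachable under Pre_: Python
-- raises ZeroDivisionError / RecursionError for MaxLevel ≤ 0).
def arrangementAux (N : Int) (L : Nat) (Energy : Int) : List (List Int) :=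
  match L with
  | 0 => []
  | 1 => [[N - Energy, Energy]]
  | Nat.succ (Nat.succ L') =>
      let Q := PySem.Int.floordiv Energy ((L' + 2 : Nat) : Int)
      (PySem.List.pyRange 0 (Q + 1) 1).foldl
        (fun l q =>
          l ++ (arrangementAux (N - q) (L' + 1) (Energy - ((L' + 2 : Nat) : Int) * q)).map
                (fun i => i ++ [q])) []

def arrangement (N : Int) (MaxLevel : Int) (Energy : Int) : List (List Int) :=
  arrangementAux N MaxLevel.toNat Energy

-- ===== PORT B =====
def arrangement_alt (N : Int) (MaxLevel : Int) (Energy : Int) : List (List Int) :=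
  let states :=
    (PySem.List.pyRange MaxLevel 1 (-1)).foldl
      (fun states level =>
        states.foldl
          (fun ns st =>
            (PySem.List.pyRange 0 (PySem.Int.floordiv st.2.1 level + 1) 1).foldl
              (fun ns q => ns ++ [(st.1 - q, st.2.1 - level * q, q :: st.2.2)]) ns)
          [])
      [(N, Energy, ([] : List Int))]
  states.map (fun st => (st.1 - st.2.1) :: st.2.1 :: st.2.2)

-- ===== PRECONDITION & SPEC =====
-- Pre_ restricts to the natural domain MaxLevel ≥ 1: for MaxLevel ≤ 0 Python A raises
-- (ZeroDivisionError at 0, RecursionError for most negative MaxLevel) or, when MaxLevel < 0 and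
-- Energy > 0, returns an accidental [] from an empty range — outside the function's intent.
def Pre_arrangement (N : Int) (MaxLevel : Int) (Energy : Int) : Prop := 1 ≤ MaxLevel
instance (N : Int) (MaxLevel : Int) (Energy : Int) : Decidable (Pre_arrangement N MaxLevel Energy) := by unfold Pre_arrangement; infer_instance
def pvWitness_arrangement : Int × Int × Int := (3, 3, 4)

def Spec_arrangement (N : Int) (MaxLevel : Int) (Energy : Int) (out : List (List Int)) : Prop := out = arrangement_alt N MaxLevel Energy
instance (N : Int) (MaxLevel : Int) (Energy : Int) (out : List (List Int)) : Decidable (Spec_arrangement N MaxLevel Energy out) := by unfold Spec_arrangement; infer_instance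

-- ===== CLAIM (what is proved, stated in full; the proofs are below) =====
def Claim_equal_arrangement : Prop := ∀ (N : Int) (MaxLevel : Int) (Energy : Int), Dom_arrangement N MaxLevel Energy → Pre_arrangement N MaxLevel Energy → Spec_arrangement N MaxLevel Energy (arrangement N MaxLevel Energy)

-- ===== LEMMAS AND PROOFS =====

-- B's per-level expansion step (exactly the body of the level loop in arrangement_alt).
def pvStep (states : List (Int × Int × List Int)) (level : Int) : List (Int × Int × List Int) :=
  states.foldl
    (fun ns st =>
      (PySem.List.pyRange 0 (PySem.Int.floordiv st.2.1 level + 1) 1).foldl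
        (fun ns q => ns ++ [(st.1 - q, st.2.1 - level * q, q :: st.2.2)]) ns)
    []

def pvPipe (levels : List Int) (states : List (Int × Int × List Int)) : List (Int × Int × List Int) :=
  levels.foldl pvStep states

def pvFin (st : Int × Int × List Int) : List Int := (st.1 - st.2.1) :: st.2.1 :: st.2.2

theorem pvStep_eq (states : List (Int × Int × List Int)) (level : Int) :
    pvStep states level =
      states.flatMap (fun st =>
        (PySem.List.pyRange 0 (PySem.Int.floordiv st.2.1 level + 1) 1).map
          (fun q => (st.1 - q, st.2.1 - level * q, q :: st.2.2))) := by
  unfold pvStep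
  simp only [PySem.List.foldl_append_singleton_eq_map]
  rw [PySem.List.foldl_append_eq_flatMap]
  simp

theorem pvStep_append (a b : List (Int × Int × List Int)) (level : Int) :
    pvStep (a ++ b) level = pvStep a level ++ pvStep b level := by
  simp [pvStep_eq]

theorem pvPipe_append (levels : List Int) :
    ∀ a b, pvPipe levels (a ++ b) = pvPipe levels a ++ pvPipe levels b := by
  induction levels with
  | nil => intro a b; simp [pvPipe]
  | cons l ls ih =>
      intro a b
      simp only [pvPipe, List.foldl_cons, pvStep_append]
      exact ih (pvStep a l) (pvStep b l)

theorem pvPipe_nil (levels : List Int) : pvPipe levels [] = [] := by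
  induction levels with
  | nil => rfl
  | cons l ls ih => simpa [pvPipe, List.foldl_cons, pvStep] using ih

theorem pvPipe_flatMap (levels : List Int) (states : List (Int × Int × List Int)) :
    pvPipe levels states = states.flatMap (fun st => pvPipe levels [st]) := by
  induction states with
  | nil => simp [pvPipe_nil]
  | cons st rest ih =>
      have h : st :: rest = [st] ++ rest := rfl
      rw [h, pvPipe_append, ih]
      simp

theorem pvMain (L : Nat) :
    ∀ (n e : Int) (s : List Int),
      (pvPipe (PySem.List.pyRange ((L : Int) + 1) 1 (-1)) [(n, e, s)]).map pvFin
        = (arrangementAux n (L + 1) e).map (· ++ s) := by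
  induction L with
  | zero =>
      intro n e s
      rw [PySem.List.pyRange_neg_one_eq_nil (by norm_num)]
      simp [pvPipe, pvFin, arrangementAux]
  | succ L ih =>
      intro n e s
      have hcast : ((L + 1 : Nat) : Int) + 1 = (L : Int) + 2 := by push_cast; ring
      rw [hcast, PySem.List.pyRange_neg_one_cons (by omega)]
      have h2 : (L : Int) + 2 - 1 = (L : Int) + 1 := by ring
      simp only [pvPipe, List.foldl_cons, h2]
      rw [show (List.foldl pvStep
            (pvStep [(n, e, s)] ((L : Int) + 2)) (PySem.List.pyRange ((L : Int) + 1) 1 (-1)))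
          = pvPipe (PySem.List.pyRange ((L : Int) + 1) 1 (-1)) (pvStep [(n, e, s)] ((L : Int) + 2)) from rfl]
      rw [pvStep_eq]
      simp only [List.flatMap_cons, List.flatMap_nil, List.append_nil]
      rw [pvPipe_flatMap, List.flatMap_map, List.map_flatMap]
      have hIH : ∀ q : Int,
          (pvPipe (PySem.List.pyRange ((L : Int) + 1) 1 (-1))
              [(n - q, e - ((L : Int) + 2) * q, q :: s)]).map pvFin
            = (arrangementAux (n - q) (L + 1) (e - ((L : Int) + 2) * q)).map (· ++ (q :: s)) := by
        intro q; exact ih (n - q) (e - ((L : Int) + 2) * q) (q :: s)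
      -- right-hand side: unfold one level of A's recursion
      show (PySem.List.pyRange 0 (PySem.Int.floordiv e ((L : Int) + 2) + 1) 1).flatMap
            (fun q => (pvPipe (PySem.List.pyRange ((L : Int) + 1) 1 (-1))
                [(n - q, e - ((L : Int) + 2) * q, q :: s)]).map pvFin)
          = (arrangementAux n (L + 2) e).map (· ++ s)
      have hA : arrangementAux n (L + 2) e
          = (PySem.List.pyRange 0 (PySem.Int.floordiv e ((L : Int) + 2) + 1) 1).flatMap
              (fun q => (arrangementAux (n - q) (L + 1) (e - ((L : Int) + 2) * q)).map
                (fun i => i ++ [q])) := by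
        show (PySem.List.pyRange 0 (PySem.Int.floordiv e (((L + 2 : Nat) : Int)) + 1) 1).foldl
              (fun l q => l ++ (arrangementAux (n - q) (L + 1) (e - ((L + 2 : Nat) : Int) * q)).map
                (fun i => i ++ [q])) [] = _
        rw [PySem.List.foldl_append_eq_flatMap]
        push_cast
        simp
      rw [hA, List.map_flatMap]
      congr 1
      funext q
      rw [hIH q, List.map_map]
      refine List.map_congr_left ?_
      intro i _
      simp

theorem alt_eq (N MaxLevel Energy : Int) :
    arrangement_alt N MaxLevel Energy
      = (pvPipe (PySem.List.pyRange MaxLevel 1 (-1)) [(N, Energy, [])]).map pvFin := rfl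

-- ===== VERDICT (by name: the statement is the Claim_ definition above) =====
theorem arrangement_spec : Claim_equal_arrangement := by
  intro N MaxLevel Energy _ hpre
  unfold Spec_arrangement
  obtain ⟨L, hL⟩ : ∃ L : Nat, MaxLevel = (L : Int) + 1 :=
    ⟨(MaxLevel - 1).toNat, by unfold Pre_arrangement at hpre; omega⟩
  have htoNat : ((L : Int) + 1).toNat = L + 1 := by omega
  rw [alt_eq, hL, pvMain L N Energy []]
  unfold arrangement
  rw [htoNat]
  simp
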